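-- pv_equiv track=rewrite | github.com/totodeltolosan/AGI | eve/interfaces/ui/core/enfant_eve/ia/planificateur_actions.py | _grouper_ressources_par_zone
-- ===== SOURCE A (Python) =====
-- from typing import Dict, List, Any
--
-- def _grouper_ressources_par_zone(ressources: List[str]) -> Dict[str, List[str]]:
--     """Groupe les ressources par zone d'acquisition"""
--     zones = {"surface": [], "underground": [], "biome_special": []}
--
--     mapping_zones = {
--         "wood": "surface",
--         "leaves": "surface",
--         "food": "surface",
--         "stone": "underground",
--         "coal": "underground",
--         "iron": "underground",
--         "diamond": "underground",
--         "redstone": "underground",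
--         "sand": "biome_special",
--         "cactus": "biome_special",
--         "ice": "biome_special",
--     }
--
--     for ressource in ressources:
--         zone = mapping_zones.get(ressource, "surface")
--         zones[zone].append(ressource)
--
--     return {k: v for k, v in zones.items() if v}  # Retirer zones vides
-- ===== SOURCE B (Python) =====
-- def _grouper_ressources_par_zone(ressources):
--     """Groupe les ressources par zone d'acquisition"""
--     mapping_zones = {
--         "wood": "surface",
--         "leaves": "surface",
--         "food": "surface",
--         "stone": "underground",
--         "coal": "underground",
--         "iron": "underground",
--         "diamond": "underground",
--         "redstone": "underground",
--         "sand": "biome_special",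
--         "cactus": "biome_special",
--         "ice": "biome_special",
--     }
--     result = {}
--     for zone in ("surface", "underground", "biome_special"):
--         members = [r for r in ressources if mapping_zones.get(r, "surface") == zone]
--         if members:
--             result[zone] = members
--     return result
-- ===== Notes on version B (the rewrite author's own statement) =====
-- stated objective: alternative
-- what changed: Replaces the single pass that appends into pre-allocated buckets (then filters empty buckets from the dict) with one independent filter scan of the resource list per zone name in fixed order, inserting a zone only when its filtered list is non-empty.
import Mathlib
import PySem

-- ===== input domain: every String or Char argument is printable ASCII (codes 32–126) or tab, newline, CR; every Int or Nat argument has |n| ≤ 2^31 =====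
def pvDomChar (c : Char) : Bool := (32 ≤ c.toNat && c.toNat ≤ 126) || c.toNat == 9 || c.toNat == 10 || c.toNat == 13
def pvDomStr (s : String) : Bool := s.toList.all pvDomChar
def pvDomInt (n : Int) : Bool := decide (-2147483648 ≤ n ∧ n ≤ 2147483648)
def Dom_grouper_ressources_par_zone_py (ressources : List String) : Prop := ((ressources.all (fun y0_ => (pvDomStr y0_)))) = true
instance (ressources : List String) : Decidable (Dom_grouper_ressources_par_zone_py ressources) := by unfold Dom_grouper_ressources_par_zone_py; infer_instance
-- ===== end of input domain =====

-- B rebuilds each zone by its own filter scan over the resource list (one scan per zone name,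
-- assembling only non-empty zones) instead of A's single appending pass into pre-built buckets;
-- objective: alternative decomposition, same cost.


-- shared constant table (the literal mapping_zones dict of both Pythons)
def pvMappingZones : PySem.Dict String String := PySem.Dict.ofList
  [("wood", "surface"), ("leaves", "surface"), ("food", "surface"),
   ("stone", "underground"), ("coal", "underground"), ("iron", "underground"),
   ("diamond", "underground"), ("redstone", "underground"),
   ("sand", "biome_special"), ("cactus", "biome_special"), ("ice", "biome_special")]

-- ===== PORT A =====
def grouper_ressources_par_zone_py (ressources : List String) : List (String × List String) :=
  let zones : PySem.Dict String (List String) :=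
    PySem.Dict.ofList [("surface", []), ("underground", []), ("biome_special", [])]
  let zones := ressources.foldl
    (fun d ressource => d.modify (pvMappingZones.getD ressource "surface") [] (· ++ [ressource])) zones
  zones.items.filter (fun kv => !kv.2.isEmpty)

-- ===== PORT B =====
def grouper_ressources_par_zone_py_alt (ressources : List String) : List (String × List String) :=
  (["surface", "underground", "biome_special"].map
      (fun zone => (zone, ressources.filter (fun r => pvMappingZones.getD r "surface" == zone)))).filter
    (fun kv => !kv.2.isEmpty)

-- ===== PRECONDITION & SPEC =====
def Spec_grouper_ressources_par_zone_py (ressources : List String) (out : List (String × List String)) : Prop := out = grouper_ressources_par_zone_py_alt ressources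
instance (ressources : List String) (out : List (String × List String)) : Decidable (Spec_grouper_ressources_par_zone_py ressources out) := by unfold Spec_grouper_ressources_par_zone_py; infer_instance

-- ===== CLAIM (what is proved, stated in full; the proofs are below) =====
def Claim_equal_grouper_ressources_par_zone_py : Prop := ∀ (ressources : List String), Dom_grouper_ressources_par_zone_py ressources → Spec_grouper_ressources_par_zone_py ressources (grouper_ressources_par_zone_py ressources)

-- ===== LEMMAS AND PROOFS =====

-- a lookup with default in a literal dict is either the default or one of the stored values
lemma pvGetD_mk_mem_or (l : List (String × String)) (k dflt : String) :
    (PySem.Dict.mk l).getD k dflt = dflt ∨ (PySem.Dict.mk l).getD k dflt ∈ l.map (·.2) := by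
  induction l with
  | nil => left; simp [PySem.Dict.getD_eq_get?_getD, PySem.Dict.get?]
  | cons a l ih =>
    rw [PySem.Dict.getD_eq_get?_getD, PySem.Dict.get?_mk_cons]
    by_cases h : a.1 == k
    · right; simp [h]
    · simp only [h, Bool.false_eq_true, if_false, ← PySem.Dict.getD_eq_get?_getD,
        List.map_cons, List.mem_cons]
      rcases ih with h' | h'
      · left; exact h'
      · right; right; exact h'

-- every lookup in the mapping (with default "surface") yields one of the three zone names
lemma pvZone_cases (r : String) :
    pvMappingZones.getD r "surface" = "surface" ∨
    pvMappingZones.getD r "surface" = "underground" ∨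
    pvMappingZones.getD r "surface" = "biome_special" := by
  rw [show pvMappingZones = PySem.Dict.mk
      [("wood", "surface"), ("leaves", "surface"), ("food", "surface"),
       ("stone", "underground"), ("coal", "underground"), ("iron", "underground"),
       ("diamond", "underground"), ("redstone", "underground"),
       ("sand", "biome_special"), ("cactus", "biome_special"), ("ice", "biome_special")] from by decide]
  have := pvGetD_mk_mem_or
      [("wood", "surface"), ("leaves", "surface"), ("food", "surface"),
       ("stone", "underground"), ("coal", "underground"), ("iron", "underground"),
       ("diamond", "underground"), ("redstone", "underground"),
       ("sand", "biome_special"), ("cactus", "biome_special"), ("ice", "biome_special")] r "surface"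
  simp only [List.map_cons, List.map_nil, List.mem_cons, List.not_mem_nil, or_false] at this
  tauto

-- one step of A's loop on the three-bucket dict
lemma pvStep (k r : String) (s u b : List String)
    (hk : k = "surface" ∨ k = "underground" ∨ k = "biome_special") :
    (PySem.Dict.mk [("surface", s), ("underground", u), ("biome_special", b)]).modify k [] (· ++ [r]) =
    PySem.Dict.mk [("surface", if k = "surface" then s ++ [r] else s),
                   ("underground", if k = "underground" then u ++ [r] else u),
                   ("biome_special", if k = "biome_special" then b ++ [r] else b)] := by
  rcases hk with h | h | h <;> subst h <;>
    simp [PySem.Dict.modify, PySem.Dict.insert, PySem.Dict.getD, PySem.Dict.get?,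
      PySem.Dict.contains]

-- invariant of A's loop: the dict after folding rs onto buckets (s, u, b) holds per-zone filters
lemma pvFold_items (rs : List String) (s u b : List String) :
    (rs.foldl
        (fun d r => d.modify (pvMappingZones.getD r "surface") [] (· ++ [r]))
        (PySem.Dict.mk [("surface", s), ("underground", u), ("biome_special", b)])) =
      PySem.Dict.mk
        [("surface", s ++ rs.filter (fun r => pvMappingZones.getD r "surface" == "surface")),
         ("underground", u ++ rs.filter (fun r => pvMappingZones.getD r "surface" == "underground")),
         ("biome_special", b ++ rs.filter (fun r => pvMappingZones.getD r "surface" == "biome_special"))] := by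
  induction rs generalizing s u b with
  | nil => simp
  | cons r rs ih =>
    rw [List.foldl_cons, pvStep _ r s u b (pvZone_cases r), ih]
    rcases pvZone_cases r with h | h | h <;>
      simp [h, List.append_assoc]

-- ===== VERDICT (by name: the statement is the Claim_ definition above) =====
theorem grouper_ressources_par_zone_py_spec : Claim_equal_grouper_ressources_par_zone_py := by
  intro ressources _
  show _ = _
  simp only [grouper_ressources_par_zone_py, grouper_ressources_par_zone_py_alt]
  rw [show PySem.Dict.ofList [("surface", ([] : List String)), ("underground", []), ("biome_special", [])] =
      PySem.Dict.mk [("surface", []), ("underground", []), ("biome_special", [])] from by decide]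
  rw [pvFold_items]
  simp
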